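-- pv_equiv track=rewrite | github.com/octopt/techblog | gan/main.py | check
-- ===== SOURCE A (Python) =====
-- def check( m ):
--     val = True
--     for i in range( 4 ):
--         for j in range( 1, 4 ):
--             for k in range( 4 ):
--                 if k < j:
--                     if m[ k ][ i ] == m[ j ][ i ]:
--                         val = False
--     return val
-- ===== SOURCE B (Python) =====
-- def check(m):
--     val = True
--     for i in range(4):
--         col = [m[k][i] for k in range(4)]
--         if len(set(col)) < 4:
--             val = False
--     return val
-- ===== Notes on version B (the rewrite author's own statement) =====
-- stated objective: simpler
-- what changed: Replaces the triple nested pairwise-comparison loop (j, k with k<j) by one pass per column that builds a set of the four column entries and flags a duplicate via len(set(col)) < 4.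
import Mathlib
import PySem

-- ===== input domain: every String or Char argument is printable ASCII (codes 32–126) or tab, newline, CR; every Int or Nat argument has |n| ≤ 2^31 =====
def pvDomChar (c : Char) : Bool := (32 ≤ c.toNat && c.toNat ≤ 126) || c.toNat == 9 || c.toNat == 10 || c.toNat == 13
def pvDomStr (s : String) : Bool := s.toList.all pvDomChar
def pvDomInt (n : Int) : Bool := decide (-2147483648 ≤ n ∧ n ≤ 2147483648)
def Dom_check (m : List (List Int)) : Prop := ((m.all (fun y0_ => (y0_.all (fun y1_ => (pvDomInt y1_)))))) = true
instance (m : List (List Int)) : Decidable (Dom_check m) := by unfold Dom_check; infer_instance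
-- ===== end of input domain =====

-- B replaces A's triple nested pairwise-comparison loop by a per-column set build
-- compared by cardinality (simpler, same cost); Pre_ excludes inputs where A raises IndexError.


-- ===== PORT A =====
-- m[k][i]; total completion with default 0 — Pre_check guarantees indices are in range
def pvAt (m : List (List Int)) (k i : Int) : Int :=
  PySem.List.pyGetD (PySem.List.pyGetD m k []) i 0

def check (m : List (List Int)) : Bool :=
  (PySem.List.pyRange 0 4 1).foldl (fun val i =>
    (PySem.List.pyRange 1 4 1).foldl (fun val j =>
      (PySem.List.pyRange 0 4 1).foldl (fun val k =>
        if k < j then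
          (if pvAt m k i = pvAt m j i then false else val)
        else val) val) val) true

-- ===== PORT B =====
def check_alt (m : List (List Int)) : Bool :=
  (PySem.List.pyRange 0 4 1).foldl (fun val i =>
    let col := (PySem.List.pyRange 0 4 1).map (fun k => pvAt m k i)
    if (PySem.Set.ofList col).length < 4 then false else val) true

-- ===== PRECONDITION & SPEC =====
-- exactly the inputs on which A returns (m[k][i] for k,i in 0..3 never raises IndexError)
def Pre_check (m : List (List Int)) : Prop :=
  4 ≤ m.length ∧ ∀ row ∈ m.take 4, 4 ≤ row.length
instance (m : List (List Int)) : Decidable (Pre_check m) := by unfold Pre_check; infer_instance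

def pvWitness_check : List (List Int) :=
  [[1,2,3,4],[5,6,7,8],[9,10,11,12],[13,14,15,16]]

def Spec_check (m : List (List Int)) (out : Bool) : Prop := out = check_alt m
instance (m : List (List Int)) (out : Bool) : Decidable (Spec_check m out) := by unfold Spec_check; infer_instance

-- ===== CLAIM (what is proved, stated in full; the proofs are below) =====
def Claim_equal_check : Prop := ∀ (m : List (List Int)), Dom_check m → Pre_check m → Spec_check m (check m)

-- ===== LEMMAS AND PROOFS =====

theorem set4_len (a b c d : Int) :
    ((PySem.Set.ofList [a,b,c,d]).length < 4) ↔ (a = b ∨ a = c ∨ a = d ∨ b = c ∨ b = d ∨ c = d) := by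
  by_cases h1 : a = b <;> by_cases h2 : a = c <;> by_cases h3 : a = d <;>
    by_cases h4 : b = c <;> by_cases h5 : b = d <;> by_cases h6 : c = d <;>
    subst_vars <;>
    simp_all [PySem.Set.ofList_eq_foldl, List.foldl, PySem.Set.add_eq_ite] <;>
    split_ifs <;> simp_all <;> omega

theorem col_core (v : Bool) (a b c d : Int) :
    (!decide (c = d) && (!decide (b = d) && (!decide (a = d) &&
      (!decide (b = c) && (!decide (a = c) && (!decide (a = b) && v))))))
    = (!decide ((PySem.Set.ofList [a, b, c, d]).length < 4) && v) := by
  simp only [set4_len]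
  by_cases h1 : a = b <;> by_cases h2 : a = c <;> by_cases h3 : a = d <;>
    by_cases h4 : b = c <;> by_cases h5 : b = d <;> by_cases h6 : c = d <;>
    simp_all

-- per column i: A's pairwise scan and B's set-cardinality test make the same update to val
theorem col_lemma (m : List (List Int)) (i : Int) (v : Bool) :
    (PySem.List.pyRange 1 4 1).foldl (fun val j =>
      (PySem.List.pyRange 0 4 1).foldl (fun val k =>
        if k < j then
          (if pvAt m k i = pvAt m j i then false else val)
        else val) val) v
    = (if (PySem.Set.ofList ((PySem.List.pyRange 0 4 1).map (fun k => pvAt m k i))).length < 4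
       then false else v) := by
  rw [show PySem.List.pyRange 0 4 1 = [0,1,2,3] from by decide,
      show PySem.List.pyRange 1 4 1 = [1,2,3] from by decide]
  simp only [List.foldl, List.map]
  norm_num
  exact col_core v (pvAt m 0 i) (pvAt m 1 i) (pvAt m 2 i) (pvAt m 3 i)

-- ===== VERDICT (by name: the statement is the Claim_ definition above) =====
theorem check_spec : Claim_equal_check := by
  intro m _ _
  unfold Spec_check check check_alt
  have hbody : (fun (val : Bool) (i : Int) =>
      (PySem.List.pyRange 1 4 1).foldl (fun val j =>
        (PySem.List.pyRange 0 4 1).foldl (fun val k =>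
          if k < j then
            (if pvAt m k i = pvAt m j i then false else val)
          else val) val) val)
      = (fun (val : Bool) (i : Int) =>
        if (PySem.Set.ofList ((PySem.List.pyRange 0 4 1).map (fun k => pvAt m k i))).length < 4
        then false else val) := by
    funext v i; exact col_lemma m i v
  rw [hbody]
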